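-- pv_equiv track=rewrite | github.com/bravandi/network_analysis_service | complex_networks/network.py | find_duplicate_edges
-- ===== SOURCE A (Python) =====
-- def find_duplicate_edges(graph_edges):
--     out_edge = dict([(e[0], []) for e in graph_edges])
--     for e in graph_edges:
--         out_edge[e[0]].append(e[1])
--
--     not_unique = []
--     for out_node, in_nodes in out_edge.items():
--         is_unique = len(out_edge[out_node]) - len(set(out_edge[out_node]))
--         if is_unique > 0:
--             not_unique.append((out_node, is_unique))
--
--     return not_unique
-- ===== SOURCE B (Python) =====
-- def find_duplicate_edges(graph_edges):
--     seen = {}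
--     dup = {}
--     for s, t in graph_edges:
--         if s not in seen:
--             seen[s] = {t}
--             dup[s] = 0
--         elif t in seen[s]:
--             dup[s] += 1
--         else:
--             seen[s].add(t)
--     return [(s, c) for s, c in dup.items() if c > 0]
-- ===== Notes on version B (the rewrite author's own statement) =====
-- stated objective: simpler
-- what changed: Single pass keeping a running duplicate counter and a per-source set of seen targets, instead of grouping all targets into per-source lists in two passes and then computing len(list)-len(set) per source.
import Mathlib
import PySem

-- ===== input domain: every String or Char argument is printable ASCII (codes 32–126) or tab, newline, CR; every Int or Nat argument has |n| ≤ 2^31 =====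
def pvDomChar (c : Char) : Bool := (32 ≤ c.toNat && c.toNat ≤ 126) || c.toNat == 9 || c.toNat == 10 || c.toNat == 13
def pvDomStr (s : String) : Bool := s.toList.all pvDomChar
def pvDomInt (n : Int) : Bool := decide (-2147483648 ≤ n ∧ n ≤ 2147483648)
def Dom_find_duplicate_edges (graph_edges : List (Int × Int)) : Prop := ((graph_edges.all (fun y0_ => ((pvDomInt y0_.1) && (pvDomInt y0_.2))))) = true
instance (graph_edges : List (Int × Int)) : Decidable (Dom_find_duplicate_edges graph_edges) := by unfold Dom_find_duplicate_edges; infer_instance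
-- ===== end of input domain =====

-- B replaces A's two-pass group-into-lists-then-len-minus-len(set) with a single pass keeping a
-- running duplicate counter and a per-source set of already-seen targets (objective: simpler).

-- ===== PORT A =====
def find_duplicate_edges (graph_edges : List (Int × Int)) : List (Int × Int) :=
  let out_edge0 : PySem.Dict Int (List Int) :=
    PySem.Dict.ofList (graph_edges.map (fun e => (e.1, ([] : List Int))))
  let out_edge : PySem.Dict Int (List Int) :=
    graph_edges.foldl (fun d e => d.modify e.1 [] (fun l => l ++ [e.2])) out_edge0
  out_edge.items.foldl (fun not_unique p =>
    let is_unique : Int :=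
      PySem.List.len (out_edge.getD p.1 []) -
        PySem.Set.len (PySem.Set.ofList (out_edge.getD p.1 []))
    if is_unique > 0 then not_unique ++ [(p.1, is_unique)] else not_unique) []

-- ===== PORT B =====
def find_duplicate_edges_alt (graph_edges : List (Int × Int)) : List (Int × Int) :=
  let st : PySem.Dict Int (PySem.Set Int) × PySem.Dict Int Int :=
    graph_edges.foldl
      (fun st e =>
        if st.1.contains e.1 = false then
          (st.1.insert e.1 (PySem.Set.ofList [e.2]), st.2.insert e.1 0)
        else if PySem.Set.contains (st.1.getD e.1 PySem.Set.empty) e.2 then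
          (st.1, st.2.modify e.1 0 (fun c => c + 1))
        else
          (st.1.insert e.1 (PySem.Set.add (st.1.getD e.1 PySem.Set.empty) e.2), st.2))
      (PySem.Dict.empty, PySem.Dict.empty)
  st.2.items.filter (fun p => p.2 > 0)

-- ===== PRECONDITION & SPEC =====
def Spec_find_duplicate_edges (graph_edges : List (Int × Int)) (out : List (Int × Int)) : Prop := out = find_duplicate_edges_alt graph_edges
instance (graph_edges : List (Int × Int)) (out : List (Int × Int)) : Decidable (Spec_find_duplicate_edges graph_edges out) := by unfold Spec_find_duplicate_edges; infer_instance

-- ===== CLAIM (what is proved, stated in full; the proofs are below) =====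
def Claim_equal_find_duplicate_edges : Prop := ∀ (graph_edges : List (Int × Int)), Dom_find_duplicate_edges graph_edges → Spec_find_duplicate_edges graph_edges (find_duplicate_edges graph_edges)

-- ===== LEMMAS AND PROOFS =====

-- sources of the edge list, targets of a given source, and its duplicate count
def pvSrcs (l : List (Int × Int)) : List Int := l.map (fun e => e.1)
def pvTgts (l : List (Int × Int)) (s : Int) : List Int :=
  (l.filter (fun e => e.1 == s)).map (fun e => e.2)
def pvCnt (l : List (Int × Int)) (s : Int) : Int :=
  PySem.List.len (pvTgts l s) - PySem.Set.len (PySem.Set.ofList (pvTgts l s))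
-- canonical value of B's two dicts after processing l
def pvSeenD (l : List (Int × Int)) : PySem.Dict Int (PySem.Set Int) :=
  ⟨(PySem.List.dedup (pvSrcs l)).map (fun s => (s, PySem.Set.ofList (pvTgts l s)))⟩
def pvDupD (l : List (Int × Int)) : PySem.Dict Int Int :=
  ⟨(PySem.List.dedup (pvSrcs l)).map (fun s => (s, pvCnt l s))⟩

theorem pv_set_ofList_append {α : Type} [BEq α] (xs : List α) (x : α) :
    PySem.Set.ofList (xs ++ [x]) = PySem.Set.add (PySem.Set.ofList xs) x := by
  simp [PySem.Set.ofList, List.foldl_append]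

theorem pv_set_add_of_mem {α : Type} [BEq α] [LawfulBEq α] (s : PySem.Set α) (x : α)
    (h : x ∈ s) : PySem.Set.add s x = s := by
  simp [PySem.Set.add, PySem.Set.contains, h]

theorem pv_set_add_of_not_mem {α : Type} [BEq α] [LawfulBEq α] (s : PySem.Set α) (x : α)
    (h : x ∉ s) : PySem.Set.add s x = s ++ [x] := by
  simp [PySem.Set.add, PySem.Set.contains, h]

theorem pv_set_update_of_subset {α : Type} [BEq α] [LawfulBEq α] (xs : List α) :
    ∀ (s : PySem.Set α), (∀ x ∈ xs, x ∈ s) → PySem.Set.update s xs = s := by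
  induction xs with
  | nil => intro s _; rfl
  | cons x xs ih =>
    intro s h
    have hx : x ∈ s := h x (by simp)
    show PySem.Set.update (PySem.Set.add s x) xs = s
    rw [pv_set_add_of_mem s x hx]
    exact ih s (fun y hy => h y (by simp [hy]))

theorem pv_tgts_nil_of_not_mem (l : List (Int × Int)) (s : Int) (h : s ∉ pvSrcs l) :
    pvTgts l s = [] := by
  unfold pvTgts
  have : l.filter (fun e => e.1 == s) = [] := by
    rw [List.filter_eq_nil_iff]
    intro a ha
    simp only [beq_iff_eq]
    intro hs
    apply h
    simp only [pvSrcs]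
    rw [← hs]
    exact List.mem_map_of_mem ha
  rw [this]; rfl

theorem pv_tgts_append (l : List (Int × Int)) (e : Int × Int) (c : Int) :
    pvTgts (l ++ [e]) c = pvTgts l c ++ (if e.1 = c then [e.2] else []) := by
  unfold pvTgts
  rw [List.filter_append, List.map_append]
  congr 1
  by_cases h : e.1 = c <;> simp [h]

-- the canonical dicts: keys, membership, lookup
theorem pv_contains_mkmap {ν : Type} (ks : List Int) (v : Int → ν) (c : Int) :
    (PySem.Dict.mk (ks.map (fun s => (s, v s))) : PySem.Dict Int ν).contains c
      = decide (c ∈ ks) := by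
  simp only [PySem.Dict.contains, List.any_map]
  by_cases h : c ∈ ks
  · simp [h]
  · simp only [h, decide_false]
    simp
    intro x hx he
    exact h (he ▸ hx)

theorem pv_get?_mkmap {ν : Type} (ks : List Int) (v : Int → ν) (c : Int)
    (hc : c ∈ ks) :
    (PySem.Dict.mk (ks.map (fun s => (s, v s))) : PySem.Dict Int ν).get? c = some (v c) := by
  induction ks with
  | nil => simp at hc
  | cons k ks ih =>
    simp only [List.map_cons, PySem.Dict.get?_mk_cons]
    by_cases h : k = c
    · subst h; simp
    · have : c ∈ ks := by cases hc with
        | head => exact absurd rfl h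
        | tail _ h' => exact h'
      simp [h, ih this]

theorem pv_getD_mkmap {ν : Type} (ks : List Int) (v : Int → ν) (c : Int) (d : ν)
    (hc : c ∈ ks) :
    (PySem.Dict.mk (ks.map (fun s => (s, v s))) : PySem.Dict Int ν).getD c d = v c := by
  simp [PySem.Dict.getD, pv_get?_mkmap ks v c hc]

theorem pv_insert_mkmap {ν : Type} (ks : List Int) (v : Int → ν) (c : Int) (w : ν)
    (hc : c ∈ ks) :
    (PySem.Dict.mk (ks.map (fun s => (s, v s))) : PySem.Dict Int ν).insert c w
      = PySem.Dict.mk (ks.map (fun s => (s, if s = c then w else v s))) := by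
  unfold PySem.Dict.insert
  rw [pv_contains_mkmap]
  simp only [decide_eq_true_eq, hc, if_pos]
  congr 1
  rw [List.map_map]
  apply List.map_congr_left
  intro a _
  by_cases h : a = c <;> simp [h, Function.comp]

-- B's loop state after processing l is exactly (pvSeenD l, pvDupD l)
theorem pv_b_loop (l : List (Int × Int)) :
    l.foldl
      (fun (st : PySem.Dict Int (PySem.Set Int) × PySem.Dict Int Int) e =>
        if st.1.contains e.1 = false then
          (st.1.insert e.1 (PySem.Set.ofList [e.2]), st.2.insert e.1 0)
        else if PySem.Set.contains (st.1.getD e.1 PySem.Set.empty) e.2 then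
          (st.1, st.2.modify e.1 0 (fun c => c + 1))
        else
          (st.1.insert e.1 (PySem.Set.add (st.1.getD e.1 PySem.Set.empty) e.2), st.2))
      (PySem.Dict.empty, PySem.Dict.empty)
    = (pvSeenD l, pvDupD l) := by
  induction l using List.reverseRecOn with
  | nil => rfl
  | append_singleton l e ih =>
    rw [List.foldl_append, ih]
    simp only [List.foldl_cons, List.foldl_nil]
    have hsrcs : pvSrcs (l ++ [e]) = pvSrcs l ++ [e.1] := by simp [pvSrcs]
    have hded : PySem.List.dedup (pvSrcs (l ++ [e]))
        = PySem.Set.add (PySem.List.dedup (pvSrcs l)) e.1 := by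
      rw [hsrcs]; simp only [PySem.List.dedup_eq_ofList]; exact pv_set_ofList_append _ _
    have hmem_ded : ∀ c, c ∈ PySem.List.dedup (pvSrcs l) ↔ c ∈ pvSrcs l := by
      intro c; simp [PySem.List.dedup_eq_ofList, PySem.Set.mem_ofList]
    have hcont : (pvSeenD l).contains e.1 = decide (e.1 ∈ pvSrcs l) := by
      unfold pvSeenD
      rw [pv_contains_mkmap]
      by_cases h : e.1 ∈ pvSrcs l <;> simp [h]
    by_cases hs : e.1 ∈ pvSrcs l
    · -- source already seen
      have hget : (pvSeenD l).getD e.1 PySem.Set.empty = PySem.Set.ofList (pvTgts l e.1) := by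
        unfold pvSeenD
        exact pv_getD_mkmap _ _ _ _ ((hmem_ded e.1).mpr hs)
      have hdedsame : PySem.List.dedup (pvSrcs (l ++ [e])) = PySem.List.dedup (pvSrcs l) := by
        rw [hded]
        exact pv_set_add_of_mem _ _ ((hmem_ded e.1).mpr hs)
      by_cases ht : e.2 ∈ pvTgts l e.1
      · -- duplicate target: count bumps
        have hsetcont : PySem.Set.contains (PySem.Set.ofList (pvTgts l e.1)) e.2 = true := by
          simp [PySem.Set.contains, PySem.Set.mem_ofList, ht]
        rw [hcont]
        simp only [hs, decide_true, Bool.true_eq_false, if_false, hget, hsetcont, if_true]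
        have hseen : pvSeenD (l ++ [e]) = pvSeenD l := by
          unfold pvSeenD
          rw [hdedsame]
          congr 1
          apply List.map_congr_left
          intro c hcded
          rw [pv_tgts_append]
          by_cases h : e.1 = c
          · subst h
            rw [if_pos rfl, pv_set_ofList_append,
              pv_set_add_of_mem _ _ ((PySem.Set.mem_ofList _ _).mpr ht)]
          · simp [h]
        have hdupget : (pvDupD l).getD e.1 0 = pvCnt l e.1 := by
          unfold pvDupD
          exact pv_getD_mkmap _ _ _ _ ((hmem_ded e.1).mpr hs)
        have hdup : (pvDupD l).modify e.1 0 (fun c => c + 1) = pvDupD (l ++ [e]) := by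
          unfold PySem.Dict.modify
          rw [hdupget]
          unfold pvDupD
          rw [pv_insert_mkmap _ _ _ _ ((hmem_ded e.1).mpr hs), hdedsame]
          congr 1
          apply List.map_congr_left
          intro c hcded
          by_cases h : c = e.1
          · subst h
            have : pvCnt (l ++ [e]) e.1 = pvCnt l e.1 + 1 := by
              unfold pvCnt
              rw [pv_tgts_append, if_pos rfl, pv_set_ofList_append,
                pv_set_add_of_mem _ _ ((PySem.Set.mem_ofList _ _).mpr ht)]
              simp [PySem.List.len, PySem.Set.len]
              omega
            simp [this]
          · have : pvCnt (l ++ [e]) c = pvCnt l c := by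
              unfold pvCnt
              rw [pv_tgts_append, if_neg (fun hh => h hh.symm)]
              simp
            simp [h, this]
        simp [hseen, hdup]
      · -- new target for a seen source: set grows, count unchanged
        have hsetcont : PySem.Set.contains (PySem.Set.ofList (pvTgts l e.1)) e.2 = false := by
          simp [PySem.Set.contains, PySem.Set.mem_ofList, ht]
        rw [hcont]
        simp only [hs, decide_true, Bool.true_eq_false, if_false, hget, hsetcont,
          Bool.false_eq_true, if_false]
        have hseen : (pvSeenD l).insert e.1
            (PySem.Set.add (PySem.Set.ofList (pvTgts l e.1)) e.2) = pvSeenD (l ++ [e]) := by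
          unfold pvSeenD
          rw [pv_insert_mkmap _ _ _ _ ((hmem_ded e.1).mpr hs), hdedsame]
          congr 1
          apply List.map_congr_left
          intro c hcded
          by_cases h : c = e.1
          · subst h
            rw [pv_tgts_append]
            simp [pv_set_ofList_append]
          · have hne : e.1 ≠ c := fun hh => h hh.symm
            rw [pv_tgts_append, if_neg hne]
            simp [h]
        have hdup : pvDupD (l ++ [e]) = pvDupD l := by
          unfold pvDupD
          rw [hdedsame]
          apply congrArg
          apply List.map_congr_left
          intro c hcded
          by_cases h : e.1 = c
          · subst h
            have : pvCnt (l ++ [e]) e.1 = pvCnt l e.1 := by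
              unfold pvCnt
              rw [pv_tgts_append, if_pos rfl, pv_set_ofList_append,
                pv_set_add_of_not_mem _ _ (fun hm => ht ((PySem.Set.mem_ofList _ _).mp hm))]
              simp [PySem.List.len, PySem.Set.len]
            rw [this]
          · have : pvCnt (l ++ [e]) c = pvCnt l c := by
              unfold pvCnt
              rw [pv_tgts_append, if_neg h]
              simp
            rw [this]
        rw [hseen, hdup]
    · -- brand-new source
      rw [hcont]
      simp only [hs, decide_false]
      have htnil : pvTgts l e.1 = [] := pv_tgts_nil_of_not_mem l e.1 hs
      have hdednew : PySem.List.dedup (pvSrcs (l ++ [e]))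
          = PySem.List.dedup (pvSrcs l) ++ [e.1] := by
        rw [hded]
        exact pv_set_add_of_not_mem _ _ (fun hm => hs ((hmem_ded e.1).mp hm))
      have hmapeq : ∀ (ν : Type) (v : List Int → ν),
          (PySem.List.dedup (pvSrcs l)).map (fun s => (s, v (pvTgts (l ++ [e]) s)))
            = (PySem.List.dedup (pvSrcs l)).map (fun s => (s, v (pvTgts l s))) := by
        intro ν v
        apply List.map_congr_left
        intro c hcded
        have hne : e.1 ≠ c := fun hh => hs (hh ▸ (hmem_ded c).mp hcded)
        rw [pv_tgts_append, if_neg hne]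
        simp
      have hseen : (pvSeenD l).insert e.1 (PySem.Set.ofList [e.2]) = pvSeenD (l ++ [e]) := by
        unfold pvSeenD
        unfold PySem.Dict.insert
        rw [pv_contains_mkmap]
        simp only [decide_eq_true_eq, hmem_ded, hs, if_false]
        rw [hdednew, List.map_append]
        apply congrArg
        congr 1
        · exact (hmapeq _ (fun t => PySem.Set.ofList t)).symm
        · simp only [List.map_cons, List.map_nil]
          rw [pv_tgts_append, if_pos rfl, htnil, List.nil_append]
      have hdup : (pvDupD l).insert e.1 0 = pvDupD (l ++ [e]) := by
        unfold pvDupD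
        unfold PySem.Dict.insert
        rw [pv_contains_mkmap]
        simp only [decide_eq_true_eq, hmem_ded, hs, if_false]
        rw [hdednew, List.map_append]
        apply congrArg
        congr 1
        · exact (hmapeq _ (fun t => PySem.List.len t - PySem.Set.len (PySem.Set.ofList t))).symm
        · have : pvCnt (l ++ [e]) e.1 = 0 := by
            unfold pvCnt
            rw [pv_tgts_append, if_pos rfl, htnil]
            simp [PySem.List.len, PySem.Set.len, PySem.Set.ofList, PySem.Set.add,
              PySem.Set.empty, PySem.Set.contains]
          simp [this]
      simp [hseen, hdup]

-- A's grouping dict: every value starts as []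
theorem pv_d0_items_nil (ps : List (Int × Int)) :
    ∀ (d : PySem.Dict Int (List Int)), (∀ p ∈ d.items, p.2 = ([] : List Int)) →
      ∀ q ∈ (d.update (ps.map (fun e => (e.1, ([] : List Int))))).items, q.2 = ([] : List Int) := by
  induction ps with
  | nil => intro d h q hq; exact h q hq
  | cons e ps ih =>
    intro d h q hq
    refine ih (d.insert e.1 []) ?_ q hq
    intro p hp
    unfold PySem.Dict.insert at hp
    by_cases hc : d.contains e.1 = true
    · rw [if_pos hc] at hp
      simp only [] at hp
      obtain ⟨r, hr, hre⟩ := List.mem_map.mp hp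
      by_cases hb : (r.1 == e.1) = true
      · rw [if_pos hb] at hre; rw [← hre]
      · rw [if_neg hb] at hre; rw [← hre]; exact h r hr
    · rw [if_neg hc] at hp
      simp only [List.mem_append, List.mem_singleton] at hp
      cases hp with
      | inl hp => exact h p hp
      | inr hp => rw [hp]

theorem pv_d0_getD (l : List (Int × Int)) (c : Int) :
    (PySem.Dict.ofList (l.map (fun e => (e.1, ([] : List Int))))).getD c [] = [] := by
  set d := PySem.Dict.ofList (l.map (fun e => (e.1, ([] : List Int)))) with hd
  cases hg : d.get? c with
  | none => exact PySem.Dict.getD_of_get?_eq_none _ _ hg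
  | some v =>
    have hv : v = [] := by
      have hm := PySem.Dict.mem_items_of_get?_eq_some _ hg
      exact pv_d0_items_nil l PySem.Dict.empty (by intro p hp; simp [PySem.Dict.empty] at hp) _ hm
    rw [PySem.Dict.getD_of_get?_eq_some _ _ hg, hv]

-- generic shape of A's output loop
theorem pv_foldl_if {β : Type} (g : Int × β → Int) (l : List (Int × β)) :
    ∀ acc, l.foldl (fun acc p => if g p > 0 then acc ++ [(p.1, g p)] else acc) acc
      = acc ++ (l.filter (fun p => decide (g p > 0))).map (fun p => (p.1, g p)) := by
  induction l with
  | nil => intro acc; simp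
  | cons x xs ih =>
    intro acc
    simp only [List.foldl_cons, List.filter_cons]
    by_cases h : g x > 0
    · simp only [h, if_pos, decide_true, ih, List.map_cons, List.append_assoc,
        List.singleton_append]
    · simp only [h, if_neg, decide_false, ih, not_false_iff]
      simp

theorem find_duplicate_edges_eq (l : List (Int × Int)) :
    find_duplicate_edges l
      = ((PySem.List.dedup (pvSrcs l)).filter (fun k => decide (pvCnt l k > 0))).map
          (fun k => (k, pvCnt l k)) := by
  have hgetD : ∀ c, (List.foldl (fun d (e : Int × Int) => d.modify e.1 [] (fun t => t ++ [e.2]))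
      (PySem.Dict.ofList (l.map (fun e => (e.1, ([] : List Int))))) l).getD c [] = pvTgts l c := by
    intro c
    rw [PySem.Dict.getD_foldl_modify_append, pv_d0_getD]
    rfl
  have hkeys0 : (PySem.Dict.ofList (l.map (fun e => (e.1, ([] : List Int))))).keys
      = PySem.List.dedup (pvSrcs l) := by
    unfold PySem.Dict.ofList PySem.Dict.update
    rw [PySem.Dict.keys_foldl_insert_key (l.map (fun e => (e.1, ([] : List Int))))
      (fun p : Int × List Int => p.1) (fun _ p => p.2) PySem.Dict.empty]
    rw [List.map_map]
    simp only [PySem.Dict.keys_empty, PySem.List.dedup_eq_ofList]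
    simp [PySem.Set.update, PySem.Set.ofList, PySem.Set.empty, pvSrcs, Function.comp_def]
  have hkeys : (List.foldl (fun d (e : Int × Int) => d.modify e.1 [] (fun t => t ++ [e.2]))
      (PySem.Dict.ofList (l.map (fun e => (e.1, ([] : List Int))))) l).keys
      = PySem.List.dedup (pvSrcs l) := by
    rw [PySem.Dict.keys_foldl_modify_key l (fun e : Int × Int => e.1) []
      (fun _ e t => t ++ [e.2]) _, hkeys0]
    rw [PySem.List.dedup_eq_ofList]
    apply pv_set_update_of_subset
    intro x hx
    exact (PySem.Set.mem_ofList _ _).mpr hx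
  have hnd : (List.foldl (fun d (e : Int × Int) => d.modify e.1 [] (fun t => t ++ [e.2]))
      (PySem.Dict.ofList (l.map (fun e => (e.1, ([] : List Int))))) l).keys.Nodup := by
    rw [hkeys, PySem.List.dedup_eq_ofList]
    exact PySem.Set.nodup_ofList _
  have hitems : (List.foldl (fun d (e : Int × Int) => d.modify e.1 [] (fun t => t ++ [e.2]))
      (PySem.Dict.ofList (l.map (fun e => (e.1, ([] : List Int))))) l).items
      = (PySem.List.dedup (pvSrcs l)).map (fun k => (k, pvTgts l k)) := by
    rw [PySem.Dict.items_eq_map_keys _ hnd [], hkeys]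
    apply List.map_congr_left
    intro k _
    rw [hgetD]
  simp only [find_duplicate_edges]
  simp only [hgetD, hitems]
  rw [pv_foldl_if (fun p => PySem.List.len (pvTgts l p.1)
      - PySem.Set.len (PySem.Set.ofList (pvTgts l p.1))) _ []]
  rw [List.nil_append, List.filter_map, List.map_map]
  have : ((fun p : Int × List Int => decide
        (PySem.List.len (pvTgts l p.1) - PySem.Set.len (PySem.Set.ofList (pvTgts l p.1)) > 0))
      ∘ (fun k => (k, pvTgts l k)))
      = (fun k : Int => decide (pvCnt l k > 0)) := by
    funext k; rfl
  rw [this]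
  apply List.map_congr_left
  intro k _
  rfl

theorem find_duplicate_edges_alt_eq (l : List (Int × Int)) :
    find_duplicate_edges_alt l
      = ((PySem.List.dedup (pvSrcs l)).filter (fun k => decide (pvCnt l k > 0))).map
          (fun k => (k, pvCnt l k)) := by
  unfold find_duplicate_edges_alt
  rw [pv_b_loop]
  show (pvDupD l).items.filter _ = _
  unfold pvDupD
  rw [List.filter_map]
  have : ((fun p : Int × Int => decide (p.2 > 0)) ∘ (fun s => (s, pvCnt l s)))
      = (fun k => decide (pvCnt l k > 0)) := by
    funext k; rfl
  rw [this]

-- ===== VERDICT (by name: the statement is the Claim_ definition above) =====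
theorem find_duplicate_edges_spec : Claim_equal_find_duplicate_edges := by
  intro l _
  show find_duplicate_edges l = find_duplicate_edges_alt l
  rw [find_duplicate_edges_eq, find_duplicate_edges_alt_eq]
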